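-- pv_equiv track=rewrite | github.com/oneishaansharma/interviewPractice | Recursion/countHi2.py | countHi
-- ===== SOURCE A (Python) =====
-- def countHi(string):
-- 	if len(string) < 2:
-- 		return 0
-- 	else:
-- 		if string[0] == 'x':
-- 			if string[1:3] == 'hi':
-- 				return countHi(string[3:])
-- 			else:
-- 				return countHi(string[1:])
-- 		else:
-- 			if string[0:2] == "hi":
-- 				return 1 + countHi(string[2:])
-- 			else:
-- 				return countHi(string[1:])
-- ===== SOURCE B (Python) =====
-- def countHi(string):
--     count = 0
--     prev_x = False
--     for c, d in zip(string, string[1:]):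
--         if c == 'h' and d == 'i' and not prev_x:
--             count += 1
--         prev_x = c == 'x'
--     return count
-- ===== Notes on version B (the rewrite author's own statement) =====
-- stated objective: faster
-- what changed: Replaced A's suffix-reslicing recursion with variable step sizes by a single stateless pairwise scan (zip of the string with its shift) that counts each 'hi' pair whose predecessor is not 'x', tracking only a prev-was-x flag.
import Mathlib
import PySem

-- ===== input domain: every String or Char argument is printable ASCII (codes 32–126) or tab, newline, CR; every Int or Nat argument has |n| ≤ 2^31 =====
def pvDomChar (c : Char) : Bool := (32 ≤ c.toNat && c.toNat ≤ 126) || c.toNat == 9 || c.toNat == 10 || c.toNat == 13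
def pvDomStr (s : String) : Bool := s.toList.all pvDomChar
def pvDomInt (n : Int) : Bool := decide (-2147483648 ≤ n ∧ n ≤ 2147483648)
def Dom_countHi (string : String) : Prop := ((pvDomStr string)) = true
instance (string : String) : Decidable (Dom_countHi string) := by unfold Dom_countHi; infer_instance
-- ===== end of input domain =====

-- B replaces A's suffix-reslicing recursion by one stateless pairwise scan counting
-- 'hi' pairs not preceded by 'x' (a prev-was-x flag is the only carried state).

-- ===== PORT A =====
-- A's recursion on the string, step for step: len<2 base case, then the four
-- branches in A's order; slicing string[k:] is taking the suffix of the char list.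
def countHiACore : List Char → Int
  | [] => 0
  | [_] => 0
  | c0 :: c1 :: rest =>
    if c0 = 'x' then
      -- string[1:3] == 'hi'
      if c1 = 'h' ∧ rest.head? = some 'i' then countHiACore (rest.drop 1)
      else countHiACore (c1 :: rest)
    else
      if c0 = 'h' ∧ c1 = 'i' then 1 + countHiACore rest
      else countHiACore (c1 :: rest)
termination_by l => l.length
decreasing_by all_goals (simp_all; try omega)

def countHi (string : String) : Int := countHiACore string.toList

-- ===== PORT B =====
-- B's 'for c, d in zip(string, string[1:])' loop as a foldl over the zipped
-- pair list, carrying (count, prev_x) exactly as Source B does.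
def countHi_alt (string : String) : Int :=
  (((string.toList).zip (PySem.List.slice string.toList (some 1) none)).foldl
    (fun (st : Int × Bool) cd =>
      (if cd.1 = 'h' ∧ cd.2 = 'i' ∧ st.2 = false then st.1 + 1 else st.1, decide (cd.1 = 'x')))
    (0, false)).1

-- ===== PRECONDITION & SPEC =====
def Spec_countHi (string : String) (out : Int) : Prop := out = countHi_alt string
instance (string : String) (out : Int) : Decidable (Spec_countHi string out) := by unfold Spec_countHi; infer_instance

-- ===== CLAIM (what is proved, stated in full; the proofs are below) =====
def Claim_equal_countHi : Prop := ∀ (string : String), Dom_countHi string → Spec_countHi string (countHi string)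

-- ===== LEMMAS AND PROOFS =====

-- proof-side characterisation: count of 'hi' pairs not preceded by 'x',
-- parameterised by whether the previous char was 'x'
def gHi : Bool → List Char → Int
  | _, [] => 0
  | px, c :: t =>
    (if c = 'h' ∧ t.head? = some 'i' ∧ px = false then 1 else 0) + gHi (decide (c = 'x')) t

theorem gHi_px_irrel (l : List Char) (h : ¬ (l.head? = some 'h' ∧ l.tail.head? = some 'i')) :
    ∀ px qx, gHi px l = gHi qx l := by
  intro px qx
  match l with
  | [] => rfl
  | c :: t =>
    simp only [List.head?_cons, List.tail_cons, Option.some.injEq, not_and] at h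
    simp only [gHi]
    congr 1
    by_cases hc : c = 'h'
    · have hi : ¬ t.head? = some 'i' := h hc
      simp [hi]
    · simp [hc]

theorem countHiACore_eq_gHi : ∀ (n : Nat) (l : List Char), l.length ≤ n →
    countHiACore l = gHi false l := by
  intro n
  induction n with
  | zero =>
    intro l hl
    match l, hl with
    | [], _ => simp [countHiACore, gHi]
  | succ n ih =>
    intro l hl
    match l with
    | [] => simp [countHiACore, gHi]
    | [c] => simp [countHiACore, gHi]
    | c0 :: c1 :: rest =>
      simp only [List.length_cons] at hl
      rw [countHiACore]
      split_ifs with h1 h2 h3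
      · -- c0 = 'x', next two are "hi": A skips 3
        obtain ⟨hc1, hr⟩ := h2
        cases rest with
        | nil => simp at hr
        | cons r0 rest' =>
          have hr0 : r0 = 'i' := by simpa using hr
          subst h1 hc1 hr0
          rw [List.drop_one, List.tail_cons, ih rest' (by simp at hl ⊢; omega)]
          simp [gHi]
      · -- c0 = 'x', next two not "hi": A skips 1
        rw [ih (c1 :: rest) (by simp at hl ⊢; omega)]
        subst h1
        have hirr := gHi_px_irrel (c1 :: rest)
          (by
            simp only [List.head?_cons, List.tail_cons, Option.some.injEq, not_and]
            intro hh hi; exact h2 ⟨hh, hi⟩) true false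
        conv_rhs => rw [gHi]
        rw [if_neg (by rintro ⟨hh, -, -⟩; exact absurd hh (by decide))]
        rw [show decide (('x' : Char) = 'x') = true from by decide, hirr]
        ring
      · -- "hi" counted
        obtain ⟨hc0, hc1⟩ := h3
        subst hc0 hc1
        rw [ih rest (by omega)]
        have d1 : ¬(('i' : Char) = 'h') := by decide
        have d2 : ¬(('i' : Char) = 'x') := by decide
        have d3 : ¬(('h' : Char) = 'x') := by decide
        cases rest with
        | nil => simp [gHi]
        | cons r0 rest' =>
          simp only [gHi, List.head?_cons, Option.some.injEq, d1, d2, d3]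
          simp
      · rw [ih (c1 :: rest) (by simp at hl ⊢; omega)]
        have hx : decide (c0 = 'x') = false := by simp [h1]
        conv_rhs => rw [gHi]
        rw [if_neg (by
          simp only [List.head?_cons, Option.some.injEq]
          rintro ⟨hh, hi, -⟩; exact h3 ⟨hh, hi⟩)]
        rw [hx]
        ring

theorem countHiBLoop_eq_gHi : ∀ (n : Nat) (l : List Char), l.length ≤ n →
    ∀ (px : Bool) (count : Int),
    ((l.zip l.tail).foldl
      (fun (st : Int × Bool) cd =>
        (if cd.1 = 'h' ∧ cd.2 = 'i' ∧ st.2 = false then st.1 + 1 else st.1, decide (cd.1 = 'x')))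
      (count, px)).1 = count + gHi px l := by
  intro n
  induction n with
  | zero =>
    intro l hl px count
    match l, hl with
    | [], _ => simp [gHi]
  | succ n ih =>
    intro l hl px count
    match l with
    | [] => simp [gHi]
    | [c] => simp [gHi]
    | c0 :: c1 :: rest =>
      simp only [List.length_cons] at hl
      rw [List.tail_cons, List.zip_cons_cons, List.foldl_cons]
      have ihh := ih (c1 :: rest) (by simp; omega)
      simp only [List.tail_cons] at ihh
      rw [ihh]
      conv_rhs => rw [gHi]
      simp only [List.head?_cons, Option.some.injEq]
      split_ifs with h <;> ring

-- ===== VERDICT (by name: the statement is the Claim_ definition above) =====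
theorem countHi_spec : Claim_equal_countHi := by
  intro s _
  unfold Spec_countHi countHi countHi_alt
  rw [countHiACore_eq_gHi s.toList.length _ le_rfl]
  rw [show PySem.List.slice s.toList (some 1) none = s.toList.tail by
        simp [PySem.List.slice_from, List.drop_one]]
  rw [countHiBLoop_eq_gHi s.toList.length _ le_rfl]
  ring
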